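-- pv_equiv track=rewrite | github.com/dakuraja/daku_bot | bot.py | parse_quiz_args
-- ===== SOURCE A (Python) =====
-- def parse_quiz_args(text: str):
--     parts = text.split()
--     args = parts[1:]
--
--     allowed_modes = {"short", "long", "full"}
--     topic = None
--     mode = "short"
--
--     for a in args:
--         al = a.lower()
--         if al in allowed_modes:
--             mode = al
--         elif topic is None:
--             topic = a
--
--     return topic, mode
-- ===== SOURCE B (Python) =====
-- def parse_quiz_args(text: str):
--     args = text.split()[1:]
--     modes = ("short", "long", "full")
--     picked = [a.lower() for a in args if a.lower() in modes]
--     topics = [a for a in args if a.lower() not in modes]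
--     return (topics[0] if topics else None, picked[-1] if picked else "short")
-- ===== Notes on version B (the rewrite author's own statement) =====
-- stated objective: alternative
-- what changed: Replaces the single stateful loop (mutable topic/mode with an elif chain) by two independent filtered passes: mode = last lowercased mode word (default 'short'), topic = first non-mode word (default None).
import Mathlib
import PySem

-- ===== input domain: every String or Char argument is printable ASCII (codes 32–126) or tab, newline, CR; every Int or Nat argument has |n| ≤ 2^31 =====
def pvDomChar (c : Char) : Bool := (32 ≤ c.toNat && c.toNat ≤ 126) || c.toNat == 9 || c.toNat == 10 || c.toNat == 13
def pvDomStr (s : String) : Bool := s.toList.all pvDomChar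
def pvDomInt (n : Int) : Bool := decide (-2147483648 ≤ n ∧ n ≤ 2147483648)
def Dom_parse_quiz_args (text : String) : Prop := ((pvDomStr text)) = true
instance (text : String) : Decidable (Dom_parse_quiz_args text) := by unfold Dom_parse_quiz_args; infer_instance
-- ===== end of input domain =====

-- B replaces A's single stateful loop by two independent filtered passes (alternative decomposition, same cost).

-- ===== PORT A =====
-- literal port of A: one fold carrying the mutable (topic, mode) state
def parse_quiz_args (text : String) : Option String × String :=
  let parts := PySem.Str.split₀ text
  let args := PySem.List.slice parts (some 1) none
  let st := args.foldl (fun (st : Option String × String) a =>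
    let al := PySem.Str.lower a
    if al = "short" ∨ al = "long" ∨ al = "full" then (st.1, al)
    else match st.1 with
      | none => (some a, st.2)
      | some _ => st) (none, "short")
  (st.1, st.2)

-- ===== PORT B =====
def pvIsMode (a : String) : Bool := decide (PySem.Str.lower a = "short" ∨ PySem.Str.lower a = "long" ∨ PySem.Str.lower a = "full")

def parse_quiz_args_alt (text : String) : Option String × String :=
  let args := PySem.List.slice (PySem.Str.split₀ text) (some 1) none
  let picked := (args.filter pvIsMode).map PySem.Str.lower
  let topics := args.filter (fun a => !pvIsMode a)
  (topics.head?, picked.getLast?.getD "short")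

-- ===== PRECONDITION & SPEC =====
def Spec_parse_quiz_args (text : String) (out : Option String × String) : Prop := out = parse_quiz_args_alt text
instance (text : String) (out : Option String × String) : Decidable (Spec_parse_quiz_args text out) := by unfold Spec_parse_quiz_args; infer_instance

-- ===== CLAIM (what is proved, stated in full; the proofs are below) =====
def Claim_equal_parse_quiz_args : Prop := ∀ (text : String), Dom_parse_quiz_args text → Spec_parse_quiz_args text (parse_quiz_args text)

-- ===== LEMMAS AND PROOFS =====

theorem pv_getLastD_cons {α : Type} (x d : α) (l : List α) :
    ((x :: l).getLast?).getD d = (l.getLast?).getD x := by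
  induction l generalizing x d with
  | nil => simp
  | cons b bs ih =>
    rw [List.getLast?_cons_cons]
    rw [ih b d, ih b x]

-- loop invariant: A's fold over args equals B's two filtered passes, for any starting state
theorem pv_fold_eq (args : List String) (t : Option String) (m : String) :
    args.foldl (fun (st : Option String × String) a =>
      let al := PySem.Str.lower a
      if al = "short" ∨ al = "long" ∨ al = "full" then (st.1, al)
      else match st.1 with
        | none => (some a, st.2)
        | some _ => st) (t, m)
    = (t.orElse (fun _ => (args.filter (fun a => !pvIsMode a)).head?),
       ((args.filter pvIsMode).map PySem.Str.lower).getLast?.getD m) := by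
  induction args generalizing t m with
  | nil => cases t <;> simp [Option.orElse]
  | cons a rest ih =>
    by_cases h : PySem.Str.lower a = "short" ∨ PySem.Str.lower a = "long" ∨ PySem.Str.lower a = "full"
    · simp only [List.foldl_cons, ih, List.filter_cons, pvIsMode, h,
        decide_true, Bool.not_true, List.map_cons]
      simp [pv_getLastD_cons]
    · cases t with
      | none =>
        simp only [List.foldl_cons, ih, List.filter_cons, pvIsMode, h,
          decide_false, Bool.not_false]
        simp [Option.orElse]
      | some v =>
        simp only [List.foldl_cons, ih, List.filter_cons, pvIsMode, h,
          decide_false, Bool.not_false]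
        simp [Option.orElse]

-- ===== VERDICT (by name: the statement is the Claim_ definition above) =====
theorem parse_quiz_args_spec : Claim_equal_parse_quiz_args := by
  intro text _
  unfold Spec_parse_quiz_args parse_quiz_args parse_quiz_args_alt
  simp only [pv_fold_eq]
  simp [Option.orElse]
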